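-- pv_equiv track=rewrite | github.com/vinod-patidar/expapp | api/serializers.py | hasNestedOperators
-- ===== SOURCE A (Python) =====
-- def hasNestedOperators(expressionValue):
--   allowedOperators = tuple('+-')
--   if allowedOperators[0] in expressionValue and allowedOperators[1] in expressionValue:
--     return True
--
--   eachCharCount = {}
--   for eachChar in expressionValue:
--       if eachChar in allowedOperators:
--         eachCharCount[eachChar] = eachCharCount.get(eachChar, 0) + 1
--         if eachCharCount[eachChar] == 2:
--             return True
--   return False
-- ===== SOURCE B (Python) =====
-- def hasNestedOperators(expressionValue):
--   # Single pass: the original's two conditions collapse to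
--   # "at least two '+'/'-' characters in total".
--   count = 0
--   for ch in expressionValue:
--     if ch == '+' or ch == '-':
--       count += 1
--       if count == 2:
--         return True
--   return False
-- ===== Notes on version B (the rewrite author's own statement) =====
-- stated objective: simpler
-- what changed: Replaced A's substring-membership pre-check plus per-operator dict counting with a single pass maintaining one integer counter of operator characters, using the fact that both of A's conditions collapse to one total-count threshold of two.
import Mathlib
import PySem

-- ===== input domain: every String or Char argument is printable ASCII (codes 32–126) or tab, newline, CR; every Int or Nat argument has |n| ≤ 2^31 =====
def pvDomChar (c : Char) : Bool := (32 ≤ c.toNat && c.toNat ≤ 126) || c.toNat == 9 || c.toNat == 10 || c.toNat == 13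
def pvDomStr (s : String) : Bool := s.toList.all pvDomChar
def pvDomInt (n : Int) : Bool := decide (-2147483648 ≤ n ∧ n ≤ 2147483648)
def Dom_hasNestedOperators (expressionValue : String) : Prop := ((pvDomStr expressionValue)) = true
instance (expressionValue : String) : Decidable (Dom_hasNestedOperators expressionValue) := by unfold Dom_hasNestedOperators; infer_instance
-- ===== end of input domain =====

-- B replaces A's substring pre-check + per-operator dict counting with one single-pass
-- integer counter of '+'/'-' characters (simpler: the two conditions collapse to
-- "at least two operator characters in total").

-- ===== PORT A =====
-- A's for-loop: dict eachCharCount as state, early return True when a count reaches 2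
def pvALoop : List Char → PySem.Dict Char Int → Bool
  | [], _ => false
  | c :: rest, d =>
    if c = '+' ∨ c = '-' then
      let d' := d.insert c (d.getD c 0 + 1)
      if d'.getD c 0 = 2 then true else pvALoop rest d'
    else pvALoop rest d

def hasNestedOperators (expressionValue : String) : Bool :=
  if PySem.Str.isIn "+" expressionValue && PySem.Str.isIn "-" expressionValue then true
  else pvALoop expressionValue.toList PySem.Dict.empty

-- ===== PORT B =====
-- B's for-loop: single integer counter, early return True at the second operator
def pvBLoop : List Char → Int → Bool
  | [], _ => false
  | c :: rest, n =>
    if c = '+' ∨ c = '-' then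
      if n + 1 = 2 then true else pvBLoop rest (n + 1)
    else pvBLoop rest n

def hasNestedOperators_alt (expressionValue : String) : Bool :=
  pvBLoop expressionValue.toList 0

-- ===== PRECONDITION & SPEC =====
def Spec_hasNestedOperators (expressionValue : String) (out : Bool) : Prop := out = hasNestedOperators_alt expressionValue
instance (expressionValue : String) (out : Bool) : Decidable (Spec_hasNestedOperators expressionValue out) := by unfold Spec_hasNestedOperators; infer_instance

-- ===== CLAIM (what is proved, stated in full; the proofs are below) =====
def Claim_equal_hasNestedOperators : Prop := ∀ (expressionValue : String), Dom_hasNestedOperators expressionValue → Spec_hasNestedOperators expressionValue (hasNestedOperators expressionValue)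

-- ===== LEMMAS AND PROOFS =====

-- B's loop returns true iff the running total reaches 2
lemma pvBLoop_eq_true_iff (l : List Char) : ∀ (n : Int), (n = 0 ∨ n = 1) →
    (pvBLoop l n = true ↔ 2 ≤ n + (l.count '+' : Int) + (l.count '-' : Int)) := by
  induction l with
  | nil => intro n hn; simp [pvBLoop]; omega
  | cons c rest ih =>
    intro n hn
    by_cases hc : c = '+' ∨ c = '-'
    · rcases hc with hc | hc <;> subst hc <;> rcases hn with hn | hn <;> subst hn <;>
        simp [pvBLoop, ih 1 (Or.inr rfl)] <;> omega
    · rw [not_or] at hc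
      simp [pvBLoop, hc, ih n hn]

-- A's loop returns true iff some per-operator running count reaches 2
lemma pvALoop_eq_true_iff (l : List Char) : ∀ (d : PySem.Dict Char Int),
    (d.getD '+' 0 = 0 ∨ d.getD '+' 0 = 1) → (d.getD '-' 0 = 0 ∨ d.getD '-' 0 = 1) →
    (pvALoop l d = true ↔
      2 ≤ d.getD '+' 0 + (l.count '+' : Int) ∨ 2 ≤ d.getD '-' 0 + (l.count '-' : Int)) := by
  induction l with
  | nil => intro d hp hm; simp [pvALoop]; omega
  | cons c rest ih =>
    intro d hp hm
    by_cases hc : c = '+' ∨ c = '-'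
    · rcases hc with hc | hc <;> subst hc
      · have hun : pvALoop ('+' :: rest) d =
            (if (d.insert '+' (d.getD '+' 0 + 1)).getD '+' 0 = 2 then true
             else pvALoop rest (d.insert '+' (d.getD '+' 0 + 1))) := by simp [pvALoop]
        have h1 : (d.insert '+' (d.getD '+' 0 + 1)).getD '+' 0 = d.getD '+' 0 + 1 := by
          simp
        have h2 : (d.insert '+' (d.getD '+' 0 + 1)).getD '-' 0 = d.getD '-' 0 := by
          rw [PySem.Dict.getD_insert]; simp
        rcases hp with hp | hp
        · rw [hun, if_neg (by rw [h1, hp]; norm_num)]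
          rw [ih _ (by rw [h1, hp]; norm_num) (by rw [h2]; exact hm)]
          rw [h1, h2, hp]
          have hcp : List.count '+' ('+' :: rest) = List.count '+' rest + 1 := by simp
          have hcm : List.count '-' ('+' :: rest) = List.count '-' rest := by simp
          rw [hcp, hcm]; push_cast; omega
        · rw [hun, if_pos (by rw [h1, hp]; norm_num)]
          have hcp : List.count '+' ('+' :: rest) = List.count '+' rest + 1 := by simp
          refine iff_of_true rfl (Or.inl ?_)
          rw [hp, hcp]; push_cast; omega
      · have hun : pvALoop ('-' :: rest) d =
            (if (d.insert '-' (d.getD '-' 0 + 1)).getD '-' 0 = 2 then true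
             else pvALoop rest (d.insert '-' (d.getD '-' 0 + 1))) := by simp [pvALoop]
        have h1 : (d.insert '-' (d.getD '-' 0 + 1)).getD '-' 0 = d.getD '-' 0 + 1 := by
          simp
        have h2 : (d.insert '-' (d.getD '-' 0 + 1)).getD '+' 0 = d.getD '+' 0 := by
          rw [PySem.Dict.getD_insert]; simp
        rcases hm with hm | hm
        · rw [hun, if_neg (by rw [h1, hm]; norm_num)]
          rw [ih _ (by rw [h2]; exact hp) (by rw [h1, hm]; norm_num)]
          rw [h1, h2, hm]
          have hcm : List.count '-' ('-' :: rest) = List.count '-' rest + 1 := by simp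
          have hcp : List.count '+' ('-' :: rest) = List.count '+' rest := by simp
          rw [hcp, hcm]; push_cast; omega
        · rw [hun, if_pos (by rw [h1, hm]; norm_num)]
          have hcm : List.count '-' ('-' :: rest) = List.count '-' rest + 1 := by simp
          refine iff_of_true rfl (Or.inr ?_)
          rw [hm, hcm]; push_cast; omega
    · rw [not_or] at hc
      simp [pvALoop, hc, ih d hp hm]

-- 'c in s' for a one-character needle is membership of the character
lemma pv_isIn_single (c : Char) (l : List Char) :
    PySem.Chars.isIn [c] l = true ↔ c ∈ l := by
  rw [PySem.Chars.isIn_iff_infix]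
  constructor
  · intro h; exact h.subset (List.mem_singleton_self c)
  · intro h
    obtain ⟨l1, l2, hl⟩ := List.append_of_mem h
    exact ⟨l1, l2, by rw [hl]; simp⟩

-- ===== VERDICT (by name: the statement is the Claim_ definition above) =====
theorem hasNestedOperators_spec : Claim_equal_hasNestedOperators := by
  intro s _
  unfold Spec_hasNestedOperators hasNestedOperators hasNestedOperators_alt
  have hB := pvBLoop_eq_true_iff s.toList 0 (Or.inl rfl)
  have hA := pvALoop_eq_true_iff s.toList PySem.Dict.empty
    (by simp [PySem.Dict.getD_empty]) (by simp [PySem.Dict.getD_empty])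
  simp only [PySem.Dict.getD_empty, zero_add] at hA hB
  have hp : PySem.Str.isIn "+" s = true ↔ '+' ∈ s.toList := by
    rw [show PySem.Str.isIn "+" s = PySem.Chars.isIn ['+'] s.toList from rfl]
    exact pv_isIn_single '+' s.toList
  have hm : PySem.Str.isIn "-" s = true ↔ '-' ∈ s.toList := by
    rw [show PySem.Str.isIn "-" s = PySem.Chars.isIn ['-'] s.toList from rfl]
    exact pv_isIn_single '-' s.toList
  by_cases h : PySem.Str.isIn "+" s = true ∧ PySem.Str.isIn "-" s = true
  · rw [if_pos (by rw [h.1, h.2]; rfl)]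
    have hcp : 0 < s.toList.count '+' := List.count_pos_iff.mpr (hp.mp h.1)
    have hcm : 0 < s.toList.count '-' := List.count_pos_iff.mpr (hm.mp h.2)
    exact (hB.mpr (by omega)).symm
  · rw [if_neg (by simpa using h)]
    have h0 : s.toList.count '+' = 0 ∨ s.toList.count '-' = 0 := by
      rcases Nat.eq_zero_or_pos (s.toList.count '+') with h1 | h1
      · exact Or.inl h1
      rcases Nat.eq_zero_or_pos (s.toList.count '-') with h2 | h2
      · exact Or.inr h2
      exact absurd ⟨hp.mpr (List.count_pos_iff.mp h1), hm.mpr (List.count_pos_iff.mp h2)⟩ h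
    rw [Bool.eq_iff_iff, hA, hB]
    constructor <;> intro hx <;> omega
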